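-- pv_equiv track=rewrite | github.com/nicwulab/HA_Abs | script/assign_clonotype.py | clean_clonotype
-- ===== SOURCE A (Python) =====
-- def clean_clonotype(clonotype_dict):
--   new_dict = {}
--   count = 0
--   for ID in sorted(clonotype_dict.keys(), key=lambda x:len(clonotype_dict[x]), reverse=True):
--     if len(clonotype_dict[ID]) > 1:
--        count += 1
--        for Ab in clonotype_dict[ID]:
--          new_dict[Ab] = count
--   return new_dict
-- ===== SOURCE B (Python) =====
-- def clean_clonotype(clonotype_dict):
--   # No comparison sort over the clusters: collect the distinct cluster sizes,
--   # walk them in descending order, and for each size > 1 scan the dict once,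
--   # numbering the clusters of that size in insertion order.  Stops as soon as
--   # the current size drops to 1 (all remaining sizes are smaller).
--   sizes = sorted({len(members) for members in clonotype_dict.values()}, reverse=True)
--   new_dict = {}
--   count = 0
--   for size in sizes:
--     if size <= 1:
--       break
--     for members in clonotype_dict.values():
--       if len(members) == size:
--         count += 1
--         for Ab in members:
--           new_dict[Ab] = count
--   return new_dict
-- ===== Notes on version B (the rewrite author's own statement) =====
-- stated objective: alternative
-- what changed: Replaces the stable comparison sort over all clusters with a set of distinct cluster sizes walked in descending order, with one scan of the dict per multi-member size (numbering clusters of that size in insertion order) and an early break once the size reaches 1.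
import Mathlib
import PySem

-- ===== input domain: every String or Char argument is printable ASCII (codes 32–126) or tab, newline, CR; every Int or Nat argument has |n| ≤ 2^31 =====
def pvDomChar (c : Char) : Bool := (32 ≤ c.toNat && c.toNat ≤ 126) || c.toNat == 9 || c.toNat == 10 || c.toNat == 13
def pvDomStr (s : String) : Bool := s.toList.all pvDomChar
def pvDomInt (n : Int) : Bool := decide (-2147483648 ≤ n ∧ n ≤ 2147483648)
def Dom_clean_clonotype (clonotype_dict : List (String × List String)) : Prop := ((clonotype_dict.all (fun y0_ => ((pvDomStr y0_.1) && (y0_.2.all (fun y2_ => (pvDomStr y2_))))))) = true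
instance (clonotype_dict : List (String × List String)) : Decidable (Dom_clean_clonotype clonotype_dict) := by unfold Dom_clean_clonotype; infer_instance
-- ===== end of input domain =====

-- B replaces A's stable comparison sort over all clusters by walking the distinct
-- cluster sizes in descending order with one dict scan per multi-member size and an
-- early break at size 1 (alternative decomposition, same return value).

-- ===== PORT A =====
-- `for ID in sorted(keys, key=lambda x: len(dict[x]), reverse=True)`: under the
-- assoc-list representation of the dict (unique keys, insertion order) this is the
-- stable reverse sort of the items by the length of their value list.
def clean_clonotype (clonotype_dict : List (String × List String)) : List (String × Int) :=
  let ids := PySem.List.sorted clonotype_dict (fun p => (p.2.length : Int)) true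
  let res := ids.foldl (fun (st : PySem.Dict String Int × Int) p =>
      if p.2.length > 1 then
        (p.2.foldl (fun nd Ab => nd.insert Ab (st.2 + 1)) st.1, st.2 + 1)
      else st) (PySem.Dict.empty, 0)
  res.1.items

-- ===== PORT B =====
-- the `for size in sizes: … break` loop of Source B, as structural recursion over the
-- descending size list, threading (new_dict, count); `break` = stop recursing.
def pvAssignBySize (d : List (String × List String)) :
    List Int → PySem.Dict String Int → Int → PySem.Dict String Int
  | [], nd, _ => nd
  | size :: rest, nd, count =>
      if size ≤ 1 then nd
      else
        let st := d.foldl (fun (st : PySem.Dict String Int × Int) p =>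
            if ((p.2.length : Int) == size) then
              (p.2.foldl (fun nd Ab => nd.insert Ab (st.2 + 1)) st.1, st.2 + 1)
            else st) (nd, count)
        pvAssignBySize d rest st.1 st.2

def clean_clonotype_alt (clonotype_dict : List (String × List String)) : List (String × Int) :=
  let sizes := PySem.List.sorted
      (PySem.Set.ofList (clonotype_dict.map (fun p => ((p.2.length : Int)))))
      (fun s => s) true
  (pvAssignBySize clonotype_dict sizes PySem.Dict.empty 0).items

-- ===== PRECONDITION & SPEC =====
def Spec_clean_clonotype (clonotype_dict : List (String × List String)) (out : List (String × Int)) : Prop := out = clean_clonotype_alt clonotype_dict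
instance (clonotype_dict : List (String × List String)) (out : List (String × Int)) : Decidable (Spec_clean_clonotype clonotype_dict out) := by unfold Spec_clean_clonotype; infer_instance

-- ===== CLAIM (what is proved, stated in full; the proofs are below) =====
def Claim_equal_clean_clonotype : Prop := ∀ (clonotype_dict : List (String × List String)), Dom_clean_clonotype clonotype_dict → Spec_clean_clonotype clonotype_dict (clean_clonotype clonotype_dict)

-- ===== LEMMAS AND PROOFS =====

theorem insertBy_split {α : Type} (before : α → α → Bool) (x : α) (l r : List α)
    (hl : ∀ y ∈ l, before x y = false) (hr : ∀ y ∈ r, before x y = true) :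
    PySem.List.insertBy before x (l ++ r) = l ++ x :: r := by
  induction l with
  | nil =>
      cases r with
      | nil => simp [PySem.List.insertBy]
      | cons y t => simp [PySem.List.insertBy, hr y (by simp)]
  | cons a l ih =>
      have ha : before x a = false := hl a (by simp)
      simp only [List.cons_append, PySem.List.insertBy, ha, Bool.false_eq_true, if_false]
      have := ih (fun y hy => hl y (by simp [hy]))
      simp [this]

theorem sorted_rev_ofList_pairwise_gt (l : List Int) :
    (PySem.List.sorted (PySem.Set.ofList l) (fun x => x) true).Pairwise (fun a b => b < a) := by
  have h := PySem.List.sorted_ofList_pairwise_lt (κ := Int) l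
  have he : PySem.List.sorted (PySem.Set.ofList l) (fun x => x) true
      = (PySem.List.sorted (PySem.Set.ofList l) (fun x => x) false).reverse := by
    apply PySem.List.sorted_rev_eq_of_perm_of_pairwise_gt
    · exact (List.reverse_perm _).trans (PySem.List.sorted_perm _ _ _)
    · exact List.pairwise_reverse.mpr (by simpa using h)
  rw [he]
  exact List.pairwise_reverse.mpr (by simpa using h)

theorem desc_drop {c : Int} : ∀ (ks : List Int), ks.Pairwise (fun a b => b < a) → c ∈ ks →
    ∃ t, ks.dropWhile (fun k => decide (c < k)) = c :: t ∧ ∀ y ∈ t, y < c := by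
  intro ks
  induction ks with
  | nil => intro _ h; simp at h
  | cons k ks ih =>
      intro hp hm
      rcases List.pairwise_cons.mp hp with ⟨hk, hp'⟩
      by_cases hck : c < k
      · have hne : c ≠ k := ne_of_lt hck
        have hcm : c ∈ ks := by
          rcases List.mem_cons.mp hm with h | h
          · exact absurd h hne
          · exact h
        rcases ih hp' hcm with ⟨t, ht, hlt⟩
        exact ⟨t, by simpa [List.dropWhile_cons, hck] using ht, hlt⟩
      · have hck2 : c = k := by
          rcases List.mem_cons.mp hm with h | h
          · exact h
          · exact absurd (hk c h) hck
        subst hck2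
        exact ⟨ks, by simp, fun y hy => hk y hy⟩

theorem desc_drop_not {c : Int} : ∀ (ks : List Int), ks.Pairwise (fun a b => b < a) → c ∉ ks →
    ∀ y ∈ ks.dropWhile (fun k => decide (c < k)), y < c := by
  intro ks
  induction ks with
  | nil => intro _ _ y hy; simp at hy
  | cons k ks ih =>
      intro hp hm
      rcases List.pairwise_cons.mp hp with ⟨hk, hp'⟩
      by_cases hck : c < k
      · have : c ∉ ks := fun h => hm (List.mem_cons_of_mem _ h)
        intro y hy
        exact ih hp' this y (by simpa [List.dropWhile_cons, hck] using hy)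
      · have hkc : k < c := lt_of_le_of_ne (not_lt.mp hck) (fun h => hm (h ▸ List.mem_cons_self))
        intro y hy
        rw [List.dropWhile_cons] at hy
        simp only [hck, decide_false] at hy
        rcases List.mem_cons.mp (by simpa using hy) with h | h
        · exact h ▸ hkc
        · exact lt_trans (hk y h) hkc

theorem sorted_rev_groups {α : Type} (xs : List α) (key : α → Int) :
    PySem.List.sorted xs key true =
      (PySem.List.sorted (PySem.Set.ofList (xs.map key)) (fun c => c) true).flatMap
        (fun c => xs.filter (fun a => key a == c)) := by
  induction xs using List.reverseRecOn with
  | nil => simp [PySem.List.sorted]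
  | append_singleton xs x ih =>
      set c := key x with hc
      set S := PySem.Set.ofList (xs.map key) with hS
      set ks := PySem.List.sorted S (fun c => c) true with hks
      have hdesc : ks.Pairwise (fun a b => b < a) := sorted_rev_ofList_pairwise_gt _
      set p : Int → Bool := fun k => decide (c < k) with hp
      set l₁ := ks.takeWhile p with hl₁
      set l₂ := ks.dropWhile p with hl₂
      have hsplit : l₁ ++ l₂ = ks := List.takeWhile_append_dropWhile
      have h₁ : ∀ y ∈ l₁, c < y := fun y hy => by
        have := List.mem_takeWhile_imp hy; simpa [hp] using this
      have hgroup : ∀ (c' : Int) (y : α), y ∈ xs.filter (fun a => key a == c') → key y = c' := by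
        intro c' y hy
        have := List.of_mem_filter hy
        simpa using this
      have hLHS : PySem.List.sorted (xs ++ [x]) key true
          = PySem.List.insertBy (fun a b => decide (key b < key a)) x (PySem.List.sorted xs key true) := by
        rw [PySem.List.sorted_rev_eq_foldl_insertBy, List.foldl_append,
          ← PySem.List.sorted_rev_eq_foldl_insertBy]
        simp
      have hmapx : (xs ++ [x]).map key = xs.map key ++ [c] := by simp [hc]
      rw [hLHS, ih]
      by_cases hcmem : c ∈ S
      · -- the size of x's cluster list already occurs: the size list is unchanged and
        -- x is appended at the end of its own size group
        have hSadd : PySem.Set.ofList ((xs ++ [x]).map key) = S := by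
          rw [hmapx, PySem.Set.ofList_append_singleton, PySem.Set.add_of_mem hcmem]
        rcases desc_drop ks hdesc (by rw [hks, PySem.List.mem_sorted]; exact hcmem) with ⟨t, ht, htlt⟩
        have hkseq : ks = l₁ ++ c :: t := by rw [← hsplit, hl₂, ht]
        rw [hSadd, ← hks, hkseq]
        simp only [List.flatMap_append, List.flatMap_cons]
        have hfl₁ : l₁.flatMap (fun c' => (xs ++ [x]).filter (fun a => key a == c'))
            = l₁.flatMap (fun c' => xs.filter (fun a => key a == c')) := by
          apply List.flatMap_congr
          intro c' hc'
          have hne : (key x == c') = false := by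
            simp only [beq_eq_false_iff_ne, ← hc]; exact ne_of_lt (h₁ c' hc')
          simp [List.filter_append, hne]
        have hft : t.flatMap (fun c' => (xs ++ [x]).filter (fun a => key a == c'))
            = t.flatMap (fun c' => xs.filter (fun a => key a == c')) := by
          apply List.flatMap_congr
          intro c' hc'
          have hne : (key x == c') = false := by
            simp only [beq_eq_false_iff_ne, ← hc]; exact (ne_of_lt (htlt c' hc')).symm
          simp [List.filter_append, hne]
        have hfc : (xs ++ [x]).filter (fun a => key a == c)
            = xs.filter (fun a => key a == c) ++ [x] := by
          simp [List.filter_append, hc]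
        rw [hfl₁, hft, hfc, ← List.append_assoc, insertBy_split]
        · simp [List.append_assoc]
        · intro y hy
          rcases List.mem_append.mp hy with hy | hy
          · rcases List.mem_flatMap.mp hy with ⟨c', hc', hyc⟩
            have hk := hgroup c' y hyc
            simp only [hk, decide_eq_false_iff_not, not_lt]
            exact le_of_lt (h₁ c' hc')
          · have hk := hgroup c y hy
            simp only [hk, decide_eq_false_iff_not, not_lt]
            exact hc.ge
        · intro y hy
          rcases List.mem_flatMap.mp hy with ⟨c', hc', hyc⟩
          have hk := hgroup c' y hyc
          simp only [hk, decide_eq_true_eq]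
          exact htlt c' hc'
      · -- a new size: it is inserted between the larger and the smaller sizes,
        -- with [x] as its whole group
        have hnotks : c ∉ ks := by rw [hks, PySem.List.mem_sorted]; exact hcmem
        have h₂ : ∀ y ∈ l₂, y < c := desc_drop_not ks hdesc hnotks
        have hSadd : PySem.Set.ofList ((xs ++ [x]).map key) = S ++ [c] := by
          rw [hmapx, PySem.Set.ofList_append_singleton, PySem.Set.add_of_not_mem hcmem]
        have hks' : PySem.List.sorted (S ++ [c]) (fun c => c) true = l₁ ++ c :: l₂ := by
          apply PySem.List.sorted_rev_eq_of_perm_of_pairwise_gt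
          · have p1 : (l₁ ++ c :: l₂).Perm (c :: (l₁ ++ l₂)) := List.perm_middle
            rw [hsplit] at p1
            have p2 : (c :: ks).Perm (c :: S) := List.Perm.cons c (PySem.List.sorted_perm _ _ _)
            have p3 : (S ++ [c]).Perm (c :: S) := List.perm_append_singleton c S
            exact (p1.trans p2).trans p3.symm
          · rw [List.pairwise_append]
            refine ⟨List.Pairwise.sublist (List.takeWhile_sublist p) hdesc, ?_, ?_⟩
            · rw [List.pairwise_cons]
              exact ⟨h₂, List.Pairwise.sublist (List.dropWhile_sublist p) hdesc⟩
            · intro a ha b hb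
              rcases List.mem_cons.mp hb with rfl | hb
              · exact h₁ a ha
              · exact lt_trans (h₂ b hb) (h₁ a ha)
        rw [hSadd, hks', ← hsplit]
        simp only [List.flatMap_append, List.flatMap_cons]
        have hfl₁ : l₁.flatMap (fun c' => (xs ++ [x]).filter (fun a => key a == c'))
            = l₁.flatMap (fun c' => xs.filter (fun a => key a == c')) := by
          apply List.flatMap_congr
          intro c' hc'
          have hne : (key x == c') = false := by
            simp only [beq_eq_false_iff_ne, ← hc]; exact ne_of_lt (h₁ c' hc')
          simp [List.filter_append, hne]
        have hfl₂ : l₂.flatMap (fun c' => (xs ++ [x]).filter (fun a => key a == c'))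
            = l₂.flatMap (fun c' => xs.filter (fun a => key a == c')) := by
          apply List.flatMap_congr
          intro c' hc'
          have hne : (key x == c') = false := by
            simp only [beq_eq_false_iff_ne, ← hc]; exact (ne_of_lt (h₂ c' hc')).symm
          simp [List.filter_append, hne]
        have hfc : (xs ++ [x]).filter (fun a => key a == c) = [x] := by
          have hnil : xs.filter (fun a => key a == c) = [] := by
            have hfa : ∀ a ∈ xs, (key a == c) = false := by
              intro a ha
              simp only [beq_eq_false_iff_ne]
              intro hkey
              exact hcmem (by
                rw [hS, PySem.Set.mem_ofList]
                exact List.mem_map.mpr ⟨a, ha, hkey⟩)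
            exact List.filter_eq_nil_iff.mpr (fun a ha => by simp [hfa a ha])
          rw [List.filter_append, hnil, List.nil_append]
          simp [← hc]
        rw [hfl₁, hfl₂, hfc]
        rw [insertBy_split]
        · simp
        · intro y hy
          rcases List.mem_flatMap.mp hy with ⟨c', hc', hyc⟩
          have hk := hgroup c' y hyc
          simp only [hk, decide_eq_false_iff_not, not_lt]
          exact le_of_lt (h₁ c' hc')
        · intro y hy
          rcases List.mem_flatMap.mp hy with ⟨c', hc', hyc⟩
          have hk := hgroup c' y hyc
          simp only [hk, decide_eq_true_eq]
          exact h₂ c' hc'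

theorem foldl_skip {α β : Type} (l : List α) (st : β) : l.foldl (fun acc _ => acc) st = st := by
  induction l generalizing st with
  | nil => rfl
  | cons a l ih => simp only [List.foldl_cons]; exact ih st

-- A's step over one size group (all members have value-list length c) is B's
-- one-scan-per-size fold when c > 1 and a no-op when c ≤ 1.
theorem group_fold (c : Int) (l : List (String × List String))
    (hl : ∀ p ∈ l, ((p.2.length : Int)) = c) (st : PySem.Dict String Int × Int) :
    l.foldl (fun (st : PySem.Dict String Int × Int) p =>
        if p.2.length > 1 then
          (p.2.foldl (fun nd Ab => nd.insert Ab (st.2 + 1)) st.1, st.2 + 1)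
        else st) st
      = if 1 < c then
          l.foldl (fun (st : PySem.Dict String Int × Int) p =>
            (p.2.foldl (fun nd Ab => nd.insert Ab (st.2 + 1)) st.1, st.2 + 1)) st
        else st := by
  by_cases hc : 1 < c
  · rw [if_pos hc]
    apply PySem.List.foldl_congr_mem
    intro acc p hp
    have hpc := hl p hp
    have hlen : p.2.length > 1 := by
      have : (1 : Int) < (p.2.length : Int) := hpc ▸ hc
      exact_mod_cast this
    simp [hlen]
  · rw [if_neg hc]
    have hskip : l.foldl (fun (st : PySem.Dict String Int × Int) p =>
        if p.2.length > 1 then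
          (p.2.foldl (fun nd Ab => nd.insert Ab (st.2 + 1)) st.1, st.2 + 1)
        else st) st = l.foldl (fun acc _ => acc) st := by
      apply PySem.List.foldl_congr_mem
      intro acc p hp
      have hpc := hl p hp
      have hlen : ¬ p.2.length > 1 := by
        intro h
        apply hc
        have : (1 : Int) < (p.2.length : Int) := by exact_mod_cast h
        omega
      simp [hlen]
    rw [hskip, foldl_skip]

-- the descending fold over the size groups (A's side, after regrouping) IS
-- pvAssignBySize: the break at size ≤ 1 loses nothing because every later size
-- is smaller and its group is a no-op for A.
theorem desc_fold (d : List (String × List String)) :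
    ∀ (ks : List Int), ks.Pairwise (fun a b => b < a) →
    ∀ (nd : PySem.Dict String Int) (count : Int),
    (ks.foldl (fun acc c => (d.filter (fun p => ((p.2.length : Int)) == c)).foldl
        (fun (st : PySem.Dict String Int × Int) p =>
          if p.2.length > 1 then
            (p.2.foldl (fun nd Ab => nd.insert Ab (st.2 + 1)) st.1, st.2 + 1)
          else st) acc) (nd, count)).1
      = pvAssignBySize d ks nd count := by
  intro ks
  induction ks with
  | nil => intro _ nd count; rfl
  | cons c rest ih =>
      intro hp nd count
      rcases List.pairwise_cons.mp hp with ⟨hc, hp'⟩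
      by_cases h1 : c ≤ 1
      · -- break: every size from here on is ≤ 1, so each group fold is the identity
        have hall : ∀ k ∈ c :: rest, ¬ 1 < k := by
          intro k hk
          rcases List.mem_cons.mp hk with rfl | hk
          · omega
          · have := hc k hk; omega
        have hid : (c :: rest).foldl (fun acc c' => (d.filter (fun p => ((p.2.length : Int)) == c')).foldl
            (fun (st : PySem.Dict String Int × Int) p =>
              if p.2.length > 1 then
                (p.2.foldl (fun nd Ab => nd.insert Ab (st.2 + 1)) st.1, st.2 + 1)
              else st) acc) (nd, count) = (c :: rest).foldl (fun acc _ => acc) (nd, count) := by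
          apply PySem.List.foldl_congr_mem
          intro acc k hk
          rw [group_fold k _ (fun p hp => by simpa using List.of_mem_filter hp) acc,
            if_neg (hall k hk)]
        rw [hid, foldl_skip, pvAssignBySize, if_pos h1]
      · rw [pvAssignBySize, if_neg h1]
        simp only [List.foldl_cons]
        rw [group_fold c _ (fun p hp => by simpa using List.of_mem_filter hp) (nd, count),
          if_pos (by omega), ← List.foldl_filter]
        exact ih hp' _ _

theorem clean_AB (d : List (String × List String)) :
    clean_clonotype d = clean_clonotype_alt d := by
  simp only [clean_clonotype, clean_clonotype_alt]
  rw [sorted_rev_groups d (fun p => ((p.2.length : Int))), List.foldl_flatMap]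
  rw [desc_fold d _ (sorted_rev_ofList_pairwise_gt _) PySem.Dict.empty 0]

-- ===== VERDICT (by name: the statement is the Claim_ definition above) =====
theorem clean_clonotype_spec : Claim_equal_clean_clonotype := by
  intro d _
  unfold Spec_clean_clonotype
  exact clean_AB d
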